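-- pv_equiv track=rewrite | github.com/jagr2808/Nakayama-algebras | compute_AG.py | I
-- ===== SOURCE A (Python) =====
-- def I(i, k, e):
--     if i==0:
--         return (0,0)
--     j = i-1
--     while(j > 0):
--         if j in e:
--             return (e[j]+1,i)
--         j -= 1
--     return (0, i)
-- ===== SOURCE B (Python) =====
-- def I(i, k, e):
--     cand = [j for j in e if 0 < j < i]
--     if cand:
--         j = max(cand)
--         return (e[j] + 1, i)
--     return (0, i)
-- ===== Notes on version B (the rewrite author's own statement) =====
-- stated objective: simpler
-- what changed: Replaced the descending early-exit position scan (and the i==0 special case, which folds into the empty-candidate return) with a single filter over the dict's keys followed by max.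
import Mathlib
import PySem

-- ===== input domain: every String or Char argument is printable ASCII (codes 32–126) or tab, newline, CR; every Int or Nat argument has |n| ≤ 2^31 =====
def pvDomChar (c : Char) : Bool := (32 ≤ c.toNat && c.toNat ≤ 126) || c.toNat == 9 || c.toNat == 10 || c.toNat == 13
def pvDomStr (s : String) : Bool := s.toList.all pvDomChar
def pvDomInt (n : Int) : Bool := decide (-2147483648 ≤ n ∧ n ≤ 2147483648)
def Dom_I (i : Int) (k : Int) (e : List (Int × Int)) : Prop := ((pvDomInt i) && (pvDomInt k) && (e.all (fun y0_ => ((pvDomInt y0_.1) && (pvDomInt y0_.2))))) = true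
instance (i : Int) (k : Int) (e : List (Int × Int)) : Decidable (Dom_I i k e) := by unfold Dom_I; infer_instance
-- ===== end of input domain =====

-- B replaces A's descending early-exit scan over integer positions by a filter of the
-- dict's keys to 0 < key < i followed by max (simpler, one pass over the dict).

-- ===== PORT A =====
-- the 'while j > 0' loop: 'j in e' is dict membership, 'e[j]' the dict lookup
def Iloop (d : PySem.Dict Int Int) (i : Int) (j : Int) : Int × Int :=
  if _h : 0 < j then
    match d.get? j with
    | some v => (v + 1, i)
    | none => Iloop d i (j - 1)
  else (0, i)
termination_by j.toNat
decreasing_by omega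

def I (i : Int) (k : Int) (e : List (Int × Int)) : Int × Int :=
  if i == 0 then (0, 0)
  else Iloop (PySem.Dict.mk e) i (i - 1)

-- ===== PORT B =====
def I_alt (i : Int) (k : Int) (e : List (Int × Int)) : Int × Int :=
  -- cand = [j for j in e if 0 < j < i]; then max(cand) and the lookup e[j]
  -- (j comes from the dict's keys, so the lookup succeeds; getD's default is never used)
  match PySem.List.max? ((PySem.Dict.mk e).keys.filter (fun j => decide (0 < j ∧ j < i))) (fun x => x) with
  | some j => (((PySem.Dict.mk e).get? j).getD 0 + 1, i)
  | none => (0, i)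

-- ===== PRECONDITION & SPEC =====
def Spec_I (i : Int) (k : Int) (e : List (Int × Int)) (out : Int × Int) : Prop := out = I_alt i k e
instance (i : Int) (k : Int) (e : List (Int × Int)) (out : Int × Int) : Decidable (Spec_I i k e out) := by unfold Spec_I; infer_instance

-- ===== CLAIM (what is proved, stated in full; the proofs are below) =====
def Claim_equal_I : Prop := ∀ (i : Int) (k : Int) (e : List (Int × Int)), Dom_I i k e → Spec_I i k e (I i k e)

-- ===== LEMMAS AND PROOFS =====

-- the scan from j downwards returns the entry of the largest key in (0, j], else (0, i)
lemma Iloop_eq (d : PySem.Dict Int Int) (i : Int) (n : Nat) (j : Int) (hn : j.toNat = n) :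
    Iloop d i j =
      match PySem.List.max? (d.keys.filter (fun x => decide (0 < x ∧ x ≤ j))) (fun x => x) with
      | some m => ((d.get? m).getD 0 + 1, i)
      | none => (0, i) := by
  induction n generalizing j with
  | zero =>
    have hj : ¬ 0 < j := by omega
    have hfil : d.keys.filter (fun x => decide (0 < x ∧ x ≤ j)) = [] := by
      apply List.filter_eq_nil_iff.mpr
      intro x _; simp; omega
    rw [Iloop, hfil]
    simp [hj, PySem.List.max?]
  | succ n ih =>
    have hj : 0 < j := by omega
    rw [Iloop]
    simp only [hj, dif_pos]
    cases hg : d.get? j with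
    | some v =>
      have hmem : j ∈ d.keys.filter (fun x => decide (0 < x ∧ x ≤ j)) := by
        have hk : j ∈ d.keys := by
          by_contra hne
          rw [(PySem.Dict.get?_eq_none_iff_not_mem_keys d j).mpr hne] at hg
          cases hg
        simp [List.mem_filter, hk]; omega
      obtain ⟨m, hm⟩ : ∃ m, PySem.List.max? (d.keys.filter (fun x => decide (0 < x ∧ x ≤ j))) (fun x => x) = some m := by
        cases hmax : PySem.List.max? (d.keys.filter (fun x => decide (0 < x ∧ x ≤ j))) (fun x => x) with
        | none =>
          rw [PySem.List.max?_eq_none_iff] at hmax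
          rw [hmax] at hmem; cases hmem
        | some m => exact ⟨m, rfl⟩
      have hle : m ≤ j := by
        have h1 := PySem.List.max?_mem hm
        have h2 := (List.mem_filter.mp h1).2
        simp at h2; omega
      have hmj : m = j := le_antisymm hle (PySem.List.max?_isMax hm j hmem)
      rw [hm, hmj]
      simp [hg]
    | none =>
      have hk : j ∉ d.keys := (PySem.Dict.get?_eq_none_iff_not_mem_keys d j).mp hg
      have hstep : d.keys.filter (fun x => decide (0 < x ∧ x ≤ j)) =
          d.keys.filter (fun x => decide (0 < x ∧ x ≤ j - 1)) := by
        apply List.filter_congr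
        intro x hx
        have hne : x ≠ j := fun hxe => hk (hxe ▸ hx)
        simp only [decide_eq_decide]
        omega
      rw [hstep, ih (j - 1) (by omega)]

-- ===== VERDICT (by name: the statement is the Claim_ definition above) =====
theorem I_spec : Claim_equal_I := by
  intro i k e _
  unfold Spec_I I I_alt
  by_cases hi : i = 0
  · subst hi
    have hfil : (PySem.Dict.mk e).keys.filter (fun j => decide (0 < j ∧ j < (0:Int))) = [] := by
      apply List.filter_eq_nil_iff.mpr
      intro x _; simp; omega
    simp only [show ((0:Int) == 0) = true from rfl, if_true, hfil, PySem.List.max?, List.foldl]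
  · have hfil : (PySem.Dict.mk e).keys.filter (fun x => decide (0 < x ∧ x ≤ i - 1)) =
        (PySem.Dict.mk e).keys.filter (fun j => decide (0 < j ∧ j < i)) := by
      apply List.filter_congr
      intro x _
      simp only [decide_eq_decide]
      omega
    rw [if_neg (by simpa using hi)]
    rw [Iloop_eq (PySem.Dict.mk e) i (i - 1).toNat (i - 1) rfl, hfil]
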